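/-
  jsmn_d.bin: THE ASSEMBLY — from the contracts of the single functions (each proved with its callees' contracts as hypotheses) to closed
  statements, bottom-up:
      jsmn_alloc_token, jsmn_fill_token     alloc_spec, fill_spec                     Prog/Jsmn/D/Alloc.lean      PROVED
      jsmn_init                             init_spec                                 Prog/Jsmn/D/Init.lean       PROVED
      jsmn_parse (composition)              parse_spec from the six case regions      Prog/Jsmn/D/Parse.lean      PROVED
      jsmn_run                              run_spec from InitSpec, ParseSpec         Prog/Jsmn/D/Run.lean        PROVED
      jsmn_main                             main_spec from RunSpec                    Prog/Jsmn/D/Main.lean       PROVED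
      the pure facts                        Jsmn.safeFacts                            Json/Jsmn/Safe.lean         PROVED
  TAKEN AS HYPOTHESES HERE (the fields of `Pending` below) and proved in Prog/Jsmn/D/Closed.lean: jsmn_parse_primitive (`prim_spec`),
  jsmn_parse_string (`str_spec`), and the regions of jsmn_parse: `open_spec`, `string_spec`, `primitive_spec`, `close_spec`, `comma_spec`,
  `final_spec`. There `theorem pending (n) : Pending n := ⟨prim_spec, str_spec, open_spec, string_spec, primitive_spec,
  close_spec, comma_spec, final_spec⟩` closes everything in this file.
-/
import Prog.Jsmn.D.Alloc
import Prog.Jsmn.D.Init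
import Prog.Jsmn.D.Parse
import Prog.Jsmn.D.Run
import Prog.Jsmn.D.Main
import Json.Jsmn.Safe

namespace X86
namespace J6
namespace D
open X86.User (CodeAt RegsKept Span FlagsOK Layout toNat_add_ofNat toNat_ofNat_lt' add_ofNat_add)
open Jsmn

/-- The contracts of jsmn_parse_primitive, of jsmn_parse_string and of the six case regions of jsmn_parse for jsmn_d.bin: taken as hypotheses
in this file, proved in Prog/Jsmn/D/Closed.lean (`pending`). -/
structure Pending (n : User.Layout) : Prop where
  /-- jsmn_parse_primitive (Prog/Jsmn/D/Prim.lean) -/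
  prim : AllocSpec binD n → FillSpec binD n → PrimSpec binD n
  /-- jsmn_parse_string (Prog/Jsmn/D/Str.lean) -/
  str : AllocSpec binD n → FillSpec binD n → StrSpec binD n
  /-- jsmn_parse, `case '{': case '['` (calls jsmn_alloc_token) -/
  «open» : SafeFacts binD.cfg → AllocSpec binD n → OpenSpec n
  /-- jsmn_parse, `case '\"'` (calls jsmn_parse_string) -/
  string : SafeFacts binD.cfg → StrSpec binD n → StringSpec n
  /-- jsmn_parse, `default:` (calls jsmn_parse_primitive) -/
  primitive : SafeFacts binD.cfg → PrimSpec binD n → PrimitiveSpec n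
  /-- jsmn_parse, `case '}': case ']'` -/
  close : SafeFacts binD.cfg → CloseSpec n
  /-- jsmn_parse, `case ','` -/
  comma : SafeFacts binD.cfg → CommaSpec n
  /-- jsmn_parse, the scan for unmatched opening brackets after the loop -/
  final : FinalSpec n

variable {n : User.Layout}

/-- jsmn_parse_primitive of jsmn_d.bin computes `Jsmn.parsePrimitive`. -/
theorem prim_of (h : Pending n) : PrimSpec binD n := h.prim (alloc_spec n) (fill_spec n)

/-- jsmn_parse_string of jsmn_d.bin computes `Jsmn.parseString`. -/
theorem str_of (h : Pending n) : StrSpec binD n := h.str (alloc_spec n) (fill_spec n)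

/-- **jsmn_parse of jsmn_d.bin computes `Jsmn.parseFuel`** (under `Inv`). -/
theorem parse_of (h : Pending n) : ParseSpec binD n :=
  have sf := Jsmn.safeFacts binD.cfg
  parse_spec sf (h.open sf (alloc_spec n)) (h.string sf (str_of h)) (h.primitive sf (prim_of h)) (h.close sf) (h.comma sf) h.final

/-- **jsmn_run of jsmn_d.bin computes `Jsmn.parseFuel` from `Parser.init`.** -/
theorem run_of (h : Pending n) : RunSpec binD n := run_spec (Jsmn.safeFacts binD.cfg) (init_spec n) (parse_of h)

/-- **jsmn_main of jsmn_d.bin leaves `encodeResult r tokens` at `out` and returns its length.** -/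
theorem main_of (h : Pending n) : MainSpec binD n := main_spec (run_of h)

end D
end J6
end X86
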